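-- pv_equiv track=rewrite | github.com/arifkhan1990/codechef-solutions | Contest/STARTERS 111/LCM_Mania.py | find_ABC
-- ===== SOURCE A (Python) =====
-- def find_ABC(N):
--     A = 1
--     while True:
--         if N & 1:
--             break
--         N //= 2
--         A *= 2
--
--     if N == 1:
--         return [-1]
--     else:
--         N = N // 2
--         return N*A, A, A
-- ===== SOURCE B (Python) =====
-- def find_ABC(N):
--     A = N & -N          # lowest set bit = the full power-of-2 factor, in one step
--     odd = N // A        # odd part of N
--     if odd == 1:
--         return [-1]
--     return odd // 2 * A, A, A
-- ===== Notes on version B (the rewrite author's own statement) =====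
-- stated objective: idiomatic
-- what changed: The while-loop that strips factors of 2 one at a time is replaced by the closed-form bit trick N & -N, which yields the whole power-of-2 factor in a single step.
import Mathlib
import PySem

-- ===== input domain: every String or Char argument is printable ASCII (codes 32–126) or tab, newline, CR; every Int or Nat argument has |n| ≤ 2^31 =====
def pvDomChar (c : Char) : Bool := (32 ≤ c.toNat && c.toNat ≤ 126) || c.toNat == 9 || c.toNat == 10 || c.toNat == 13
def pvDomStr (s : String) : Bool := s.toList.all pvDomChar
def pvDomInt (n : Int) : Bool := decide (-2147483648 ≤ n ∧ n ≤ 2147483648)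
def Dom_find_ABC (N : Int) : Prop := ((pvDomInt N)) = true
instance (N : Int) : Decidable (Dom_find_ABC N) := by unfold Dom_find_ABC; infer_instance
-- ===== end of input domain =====

-- B replaces A's while-loop stripping factors of 2 with the closed-form bit trick N & -N (idiomatic, loop-free).
-- Python A returns a 3-tuple in the non-[-1] case; both ports return it as a 3-element list.

-- ===== PORT A =====
-- the `while True:` loop of A; fuel (natAbs N + 1 at the call site) only makes it total — on every
-- N ≠ 0 the loop breaks before the fuel runs out, so this is a step-for-step transcription of A's loop
def stripTwos : Nat → Int → Int → Int × Int
  | 0, N, A => (N, A)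
  | fuel+1, N, A =>
    if PySem.Int.band N 1 ≠ 0 then (N, A)
    else stripTwos fuel (PySem.Int.floordiv N 2) (A * 2)

def find_ABC (N : Int) : List Int :=
  let r := stripTwos (N.natAbs + 1) N 1
  if r.1 = 1 then [-1]
  else [PySem.Int.floordiv r.1 2 * r.2, r.2, r.2]

-- ===== PORT B =====
def find_ABC_alt (N : Int) : List Int :=
  let a := PySem.Int.band N (-N)
  let odd := PySem.Int.floordiv N a
  if odd = 1 then [-1]
  else [PySem.Int.floordiv odd 2 * a, a, a]

-- ===== PRECONDITION & SPEC =====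
-- Pre_ excludes exactly N = 0: there A's while-loop never terminates (no return), and B raises ZeroDivisionError
def Pre_find_ABC (N : Int) : Prop := N ≠ 0
instance (N : Int) : Decidable (Pre_find_ABC N) := by unfold Pre_find_ABC; infer_instance
def pvWitness_find_ABC : Int := (6)
def Spec_find_ABC (N : Int) (out : List Int) : Prop := out = find_ABC_alt N
instance (N : Int) (out : List Int) : Decidable (Spec_find_ABC N out) := by unfold Spec_find_ABC; infer_instance

-- ===== CLAIM (what is proved, stated in full; the proofs are below) =====
def Claim_equal_find_ABC : Prop := ∀ (N : Int), Dom_find_ABC N → Pre_find_ABC N → Spec_find_ABC N (find_ABC N)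

-- ===== LEMMAS AND PROOFS =====

-- bit lemma: for odd m, m &&& (m-1) keeps all of m's bits except the low one
theorem pv_odd_and (k : Nat) : (2*k+1) &&& (2*k) = 2*k := by
  apply Nat.eq_of_testBit_eq
  intro i
  rw [Nat.testBit_and]
  cases i with
  | zero => simp [Nat.testBit_zero]
  | succ i =>
    have h1 : (2*k+1)/2 = k := by omega
    have h2 : 2*k/2 = k := by omega
    simp only [Nat.testBit_add_one, h1, h2, Bool.and_self]

theorem pv_even_and (k : Nat) : (2*k) &&& (2*k-1) = 2*(k &&& (k-1)) := by
  apply Nat.eq_of_testBit_eq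
  intro i
  rw [Nat.testBit_and]
  cases i with
  | zero => simp [Nat.testBit_zero]
  | succ i =>
    have h1 : 2*k/2 = k := by omega
    have h2 : (2*k-1)/2 = k-1 := by omega
    have h3 : 2*(k &&& (k-1))/2 = k &&& (k-1) := by omega
    simp only [Nat.testBit_add_one, h1, h2, h3, Nat.testBit_and]

-- Python's N & -N expressed through natAbs over Nat
theorem pv_band_neg_self (N : Int) (h : N ≠ 0) :
    PySem.Int.band N (-N) = ((N.natAbs - (N.natAbs &&& (N.natAbs - 1)) : Nat) : Int) := by
  unfold PySem.Int.band
  rcases lt_trichotomy N 0 with hneg | hz | hpos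
  · rw [if_neg (by omega), if_pos (by omega)]
    have h1 : (-N).toNat = N.natAbs := by omega
    have h2 : (-N - 1).toNat = N.natAbs - 1 := by omega
    rw [h1, h2]
  · exact absurd hz h
  · rw [if_pos (by omega), if_neg (by omega)]
    have h1 : N.toNat = N.natAbs := by omega
    have h2 : (-(-N) - 1).toNat = N.natAbs - 1 := by omega
    rw [h1, h2]

theorem pv_g_odd (m : Nat) (hm : m % 2 = 1) : m - (m &&& (m-1)) = 1 := by
  obtain ⟨k, hk⟩ : ∃ k, m = 2*k+1 := ⟨m/2, by omega⟩
  subst hk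
  have : (2*k+1) - 1 = 2*k := by omega
  rw [this, pv_odd_and]
  omega

theorem pv_g_even (m : Nat) (hm : m % 2 = 0) :
    m - (m &&& (m-1)) = 2 * ((m/2) - ((m/2) &&& (m/2-1))) := by
  obtain ⟨k, hk⟩ : ∃ k, m = 2*k := ⟨m/2, by omega⟩
  subst hk
  have h2 : 2*k/2 = k := by omega
  rw [pv_even_and, h2]
  have := Nat.and_le_left (n := k) (m := k-1)
  omega

theorem pv_mod2 (N : Int) : PySem.Int.mod N 2 = N % 2 := by
  unfold PySem.Int.mod
  rw [Int.fmod_eq_emod]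
  omega

-- loop invariant: with enough fuel, A's loop computes exactly (N // (N & -N), A * (N & -N)),
-- and N & -N is a positive divisor of N
theorem pv_strip_spec : ∀ m : Nat, ∀ N A : Int, N ≠ 0 → N.natAbs ≤ m →
    0 < PySem.Int.band N (-N) ∧ PySem.Int.band N (-N) ∣ N ∧
    stripTwos (m+1) N A = (PySem.Int.floordiv N (PySem.Int.band N (-N)), A * PySem.Int.band N (-N)) := by
  intro m
  induction m using Nat.strong_induction_on with
  | _ m IH =>
    intro N A hN hle
    rw [pv_band_neg_self N hN]
    by_cases hpar : N % 2 = 0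
    · -- even case: one loop iteration, then the IH on N/2
      obtain ⟨t, ht⟩ : ∃ t, N = 2*t := ⟨N/2, by omega⟩
      have htn : t ≠ 0 := by omega
      have habs : N.natAbs = 2 * t.natAbs := by subst ht; omega
      have hm2 : 2 ≤ m := by omega
      have hfd : PySem.Int.floordiv N 2 = t := by
        unfold PySem.Int.floordiv; subst ht; exact Int.mul_fdiv_cancel_left _ (by norm_num)
      obtain ⟨hpos, hdvd, hrec⟩ := IH (m-1) (by omega) t (A*2) htn (by omega)
      rw [pv_band_neg_self t htn] at hpos hdvd hrec
      have hg : (N.natAbs - (N.natAbs &&& (N.natAbs - 1)) : Nat)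
          = 2 * (t.natAbs - (t.natAbs &&& (t.natAbs - 1))) := by
        rw [pv_g_even N.natAbs (by omega), habs]
        have : 2 * t.natAbs / 2 = t.natAbs := by omega
        rw [this]
      rw [hg]
      push_cast
      set B : Int := ((t.natAbs - (t.natAbs &&& (t.natAbs - 1)) : Nat) : Int) with hB
      refine ⟨by positivity, ?_, ?_⟩
      · obtain ⟨q, hq⟩ := hdvd
        exact ⟨q, by rw [ht, hq]; ring⟩
      · have hstep : stripTwos (m+1) N A = stripTwos ((m-1)+1) t (A*2) := by
          have hm : m + 1 = ((m-1)+1) + 1 := by omega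
          rw [hm]
          show (if PySem.Int.band N 1 ≠ 0 then (N, A)
                else stripTwos ((m-1)+1) (PySem.Int.floordiv N 2) (A * 2)) = _
          rw [if_neg (by rw [PySem.Int.band_one, pv_mod2]; omega), hfd]
        rw [hstep, hrec]
        obtain ⟨q, hq⟩ := hdvd
        have hq2 : N = 2 * B * q := by rw [ht, hq]; ring
        have hfd1 : PySem.Int.floordiv N (2*B) = q := by
          unfold PySem.Int.floordiv; rw [hq2]; exact Int.mul_fdiv_cancel_left _ (by positivity)
        have hfd2 : PySem.Int.floordiv t B = q := by
          unfold PySem.Int.floordiv; rw [hq]; exact Int.mul_fdiv_cancel_left _ (by positivity)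
        rw [hfd1, hfd2]
        exact Prod.ext rfl (by ring)
    · -- odd case: the loop breaks immediately and N & -N = 1
      have hg : (N.natAbs - (N.natAbs &&& (N.natAbs - 1)) : Nat) = 1 :=
        pv_g_odd N.natAbs (by omega)
      rw [hg]
      push_cast
      refine ⟨by norm_num, one_dvd N, ?_⟩
      show (if PySem.Int.band N 1 ≠ 0 then (N, A) else _) = _
      rw [if_pos (by rw [PySem.Int.band_one, pv_mod2]; omega)]
      have : PySem.Int.floordiv N 1 = N := by
        unfold PySem.Int.floordiv; simp [Int.fdiv_one]
      rw [this]
      exact Prod.ext rfl (by ring)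

-- ===== VERDICT (by name: the statement is the Claim_ definition above) =====
theorem find_ABC_spec : Claim_equal_find_ABC := by
  intro N _ hN
  obtain ⟨_, _, hrec⟩ := pv_strip_spec N.natAbs N 1 hN (le_refl _)
  unfold Spec_find_ABC find_ABC find_ABC_alt
  rw [hrec]
  simp
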